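-- pv_equiv track=rewrite | github.com/Mmark94/SCRaMbLE-SIM | Mapping_coverage_MM.py | abs_sort_path_list
-- ===== SOURCE A (Python) =====
-- def abs_sort_path(path):
--     new_path = []
--     #new_path = [abs(x) for x in path]
--     for number in path:
--         new_path.append(abs(number))
--     new_path.sort()
--     return new_path
--
-- def abs_sort_path_list(paths):
--     new_paths = []
--     for path in paths:
--         new_paths.append(abs_sort_path(path))
--     new_paths2 = []
--     for path in new_paths:
--         for number in path:
--             new_paths2.append(number)
--     new_paths2.sort()
--     return new_paths2
-- ===== SOURCE B (Python) =====
-- def _merge(xs, ys):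
--     # two-pointer merge of two sorted lists
--     i = 0
--     j = 0
--     out = []
--     while i < len(xs) and j < len(ys):
--         if xs[i] <= ys[j]:
--             out.append(xs[i])
--             i += 1
--         else:
--             out.append(ys[j])
--             j += 1
--     out.extend(xs[i:])
--     out.extend(ys[j:])
--     return out
--
-- def abs_sort_path_list(paths):
--     # k-way merge: each path becomes its sorted list of absolute values,
--     # then the sorted runs are combined by rounds of balanced two-pointer
--     # merges instead of a full comparison sort of the concatenation.
--     runs = [sorted(abs(x) for x in p) for p in paths]
--     while len(runs) > 1:
--         merged = []
--         i = 0
--         while i + 1 < len(runs):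
--             merged.append(_merge(runs[i], runs[i + 1]))
--             i += 2
--         if i < len(runs):
--             merged.append(runs[i])
--         runs = merged
--     return runs[0] if runs else []
-- ===== Notes on version B (the rewrite author's own statement) =====
-- stated objective: alternative
-- what changed: Instead of flattening the per-path sorted lists and running a full comparison sort over all N numbers, B performs a k-way merge: it merges the already-sorted per-path runs in balanced rounds of two-pointer merges until one run remains.
import Mathlib
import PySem

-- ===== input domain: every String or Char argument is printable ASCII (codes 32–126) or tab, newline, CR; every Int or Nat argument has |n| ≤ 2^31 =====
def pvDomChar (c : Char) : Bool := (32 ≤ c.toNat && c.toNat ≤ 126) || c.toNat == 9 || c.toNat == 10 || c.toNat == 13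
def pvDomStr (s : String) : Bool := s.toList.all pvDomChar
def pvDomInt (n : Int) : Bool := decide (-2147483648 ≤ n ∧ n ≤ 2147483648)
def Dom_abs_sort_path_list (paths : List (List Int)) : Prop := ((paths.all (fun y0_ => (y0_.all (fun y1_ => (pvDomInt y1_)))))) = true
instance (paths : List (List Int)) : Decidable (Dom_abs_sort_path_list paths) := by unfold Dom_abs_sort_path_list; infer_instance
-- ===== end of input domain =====

-- B replaces A's flatten-then-full-sort by balanced rounds of two-pointer merges of the per-path sorted runs (alternative algorithm, same value).

-- ===== PORT A =====
def abs_sort_path (path : List Int) : List Int :=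
  let new_path := path.foldl (fun acc number => acc ++ [|number|]) []
  PySem.List.sorted new_path (fun x => x) false

def abs_sort_path_list (paths : List (List Int)) : List Int :=
  let new_paths := paths.foldl (fun acc path => acc ++ [abs_sort_path path]) []
  let new_paths2 := new_paths.foldl (fun acc path =>
    path.foldl (fun acc2 number => acc2 ++ [number]) acc) []
  PySem.List.sorted new_paths2 (fun x => x) false

-- ===== PORT B =====
-- two-pointer merge of two sorted lists (Source B's _merge while loop as structural recursion)
def pvMerge : List Int → List Int → List Int
  | [], ys => ys
  | x :: xs, [] => x :: xs
  | x :: xs, y :: ys => if x ≤ y then x :: pvMerge xs (y :: ys) else y :: pvMerge (x :: xs) ys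

-- one round of Source B's inner while loop: merge adjacent pairs of runs
def pvMergePairs : List (List Int) → List (List Int)
  | a :: b :: rest => pvMerge a b :: pvMergePairs rest
  | runs => runs

theorem pvMergePairs_length (l : List (List Int)) : (pvMergePairs l).length ≤ l.length := by
  fun_induction pvMergePairs l with
  | case1 a b rest ih => simp; omega
  | case2 _ _ => exact le_refl _

-- Source B's outer while loop: keep merging rounds until at most one run is left
def pvMergeAll : List (List Int) → List Int
  | [] => []
  | [r] => r
  | a :: b :: rest => pvMergeAll (pvMergePairs (a :: b :: rest))
termination_by runs => runs.length
decreasing_by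
  have := pvMergePairs_length rest
  simp [pvMergePairs]; omega

def abs_sort_path_list_alt (paths : List (List Int)) : List Int :=
  pvMergeAll (paths.map (fun p => PySem.List.sorted (p.map (fun x => |x|)) (fun x => x) false))

-- ===== PRECONDITION & SPEC =====
def Spec_abs_sort_path_list (paths : List (List Int)) (out : List Int) : Prop := out = abs_sort_path_list_alt paths
instance (paths : List (List Int)) (out : List Int) : Decidable (Spec_abs_sort_path_list paths out) := by unfold Spec_abs_sort_path_list; infer_instance

-- ===== CLAIM (what is proved, stated in full; the proofs are below) =====
def Claim_equal_abs_sort_path_list : Prop := ∀ (paths : List (List Int)), Dom_abs_sort_path_list paths → Spec_abs_sort_path_list paths (abs_sort_path_list paths)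

-- ===== LEMMAS AND PROOFS =====

theorem pvMerge_eq_merge (xs ys : List Int) :
    pvMerge xs ys = List.merge xs ys (fun a b => a ≤ b) := by
  fun_induction pvMerge xs ys <;> simp_all

theorem pvMerge_perm (xs ys : List Int) : (pvMerge xs ys).Perm (xs ++ ys) := by
  rw [pvMerge_eq_merge]; exact List.merge_perm_append _

theorem pvMerge_pairwise {xs ys : List Int}
    (hx : xs.Pairwise (· ≤ ·)) (hy : ys.Pairwise (· ≤ ·)) :
    (pvMerge xs ys).Pairwise (· ≤ ·) := by
  rw [pvMerge_eq_merge]; exact List.Pairwise.merge hx hy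

theorem foldl_append_singleton {α β : Type} (f : α → β) (xs : List α) (acc : List β) :
    xs.foldl (fun acc x => acc ++ [f x]) acc = acc ++ xs.map f := by
  induction xs generalizing acc with
  | nil => simp
  | cons x xs ih => simp [List.foldl_cons, ih]

theorem inner_flatten (paths : List (List Int)) (acc : List Int) :
    paths.foldl (fun acc path => path.foldl (fun a n => a ++ [n]) acc) acc
      = acc ++ paths.flatten := by
  induction paths generalizing acc with
  | nil => simp
  | cons p ps ih =>
      rw [List.foldl_cons, foldl_append_singleton (f := fun n => n), ih]
      simp

theorem pvMergePairs_pairwise {l : List (List Int)}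
    (h : ∀ r ∈ l, r.Pairwise (· ≤ ·)) :
    ∀ r ∈ pvMergePairs l, r.Pairwise (· ≤ ·) := by
  fun_induction pvMergePairs l with
  | case1 a b rest ih =>
      intro r hr
      simp only [List.mem_cons] at hr
      rcases hr with hr | hr
      · exact hr ▸ pvMerge_pairwise (h a (by simp)) (h b (by simp))
      · exact ih (fun r hr => h r (by simp [hr])) r hr
  | case2 => exact h

theorem pvMergePairs_flatten_perm (l : List (List Int)) :
    (pvMergePairs l).flatten.Perm l.flatten := by
  fun_induction pvMergePairs l with
  | case1 a b rest ih =>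
      simp only [List.flatten_cons]
      exact ((pvMerge_perm a b).append ih).trans (List.Perm.of_eq (by simp))
  | case2 => exact List.Perm.refl _

theorem pvMergeAll_spec (l : List (List Int)) (h : ∀ r ∈ l, r.Pairwise (· ≤ ·)) :
    (pvMergeAll l).Pairwise (· ≤ ·) ∧ (pvMergeAll l).Perm l.flatten := by
  fun_induction pvMergeAll l with
  | case1 => simp
  | case2 r => simpa using h r (by simp)
  | case3 a b rest ih =>
      have hstep := ih (pvMergePairs_pairwise h)
      exact ⟨hstep.1, hstep.2.trans (pvMergePairs_flatten_perm _)⟩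

theorem abs_sort_path_eq (p : List Int) :
    abs_sort_path p = PySem.List.sorted (p.map (fun x => |x|)) (fun x => x) false := by
  unfold abs_sort_path
  rw [foldl_append_singleton (f := fun x => |x|)]
  simp

-- ===== VERDICT (by name: the statement is the Claim_ definition above) =====
theorem abs_sort_path_list_spec : Claim_equal_abs_sort_path_list := by
  intro paths _
  show abs_sort_path_list paths = abs_sort_path_list_alt paths
  unfold abs_sort_path_list abs_sort_path_list_alt
  dsimp only
  rw [foldl_append_singleton (f := abs_sort_path), inner_flatten]
  simp only [List.nil_append]
  have hspec := pvMergeAll_spec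
    (paths.map (fun p => PySem.List.sorted (p.map (fun x => |x|)) (fun x => x) false))
    (by
      intro r hr
      simp only [List.mem_map] at hr
      obtain ⟨p, _, rfl⟩ := hr
      simpa using PySem.List.sorted_pairwise (p.map (fun x => |x|)) (fun x => x))
  refine PySem.List.sorted_id_eq_of_perm_of_pairwise ((paths.map abs_sort_path).flatten) _ ?_ hspec.1
  refine hspec.2.trans ?_
  have : paths.map (fun p => PySem.List.sorted (p.map (fun x => |x|)) (fun x => x) false)
      = paths.map abs_sort_path := by
    simp [abs_sort_path_eq]
  rw [this]
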